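-- pv_equiv track=rewrite | github.com/ThriveAI-Solutions/thrive_ui | utils/report_service.py | _normalize_question
-- ===== SOURCE A (Python) =====
-- def _normalize_question(text: str) -> str:
--     """Normalize a question by removing common prefixes and filler words.
--
--     This improves matching for semantically identical questions like:
--     - "what were the top diagnosis" vs "top diagnosis"
--     - "show me patients by age" vs "patients by age"
--     """
--     if not text:
--         return ""
--
--     normalized = text.lower().strip()
--
--     # Common question prefixes to strip (order matters - longer first)
--     prefixes = [
--         "can you show me ",
--         "can you tell me ",
--         "can you give me ",
--         "can you list ",
--         "please show me ",
--         "please tell me ",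
--         "please give me ",
--         "please list ",
--         "what were the ",
--         "what are the ",
--         "what is the ",
--         "what was the ",
--         "show me the ",
--         "give me the ",
--         "tell me the ",
--         "list the ",
--         "show me ",
--         "give me ",
--         "tell me ",
--         "list ",
--         "what ",
--         "how many ",
--         "how much ",
--     ]
--
--     for prefix in prefixes:
--         if normalized.startswith(prefix):
--             normalized = normalized[len(prefix):]
--             break  # Only strip one prefix
--
--     return normalized.strip()
-- ===== SOURCE B (Python) =====
-- def _normalize_question(text: str) -> str:
--     """Normalize a question: strip the LONGEST matching question prefix
--     (built compositionally from verb/tense parts) instead of scanning an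
--     ordered flat list and breaking on the first match."""
--     if not text:
--         return ""
--
--     normalized = text.lower().strip()
--
--     prefixes = (
--         ["can you " + v + " " for v in ("show me", "tell me", "give me", "list")]
--         + ["please " + v + " " for v in ("show me", "tell me", "give me", "list")]
--         + ["what " + t + " the " for t in ("were", "are", "is", "was")]
--         + [v + " the " for v in ("show me", "give me", "tell me", "list")]
--         + [v + " " for v in ("show me", "give me", "tell me", "list")]
--         + ["what ", "how many ", "how much "]
--     )
--
--     # No prefix is a proper prefix of a later one, so the longest match
--     # coincides with the first match of the original ordered scan.
--     best = ""
--     for p in prefixes: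
--         if len(p) > len(best) and normalized.startswith(p):
--             best = p
--
--     return normalized[len(best):].strip()
-- ===== Notes on version B (the rewrite author's own statement) =====
-- stated objective: alternative
-- what changed: B builds the prefix table compositionally from verb/tense parts and selects the longest matching prefix with an order-independent max-by-length fold, instead of A's ordered flat-list scan that strips the first match and breaks; equal because no prefix in the list is a proper prefix of a later one, so longest-match = first-match.
import Mathlib
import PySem

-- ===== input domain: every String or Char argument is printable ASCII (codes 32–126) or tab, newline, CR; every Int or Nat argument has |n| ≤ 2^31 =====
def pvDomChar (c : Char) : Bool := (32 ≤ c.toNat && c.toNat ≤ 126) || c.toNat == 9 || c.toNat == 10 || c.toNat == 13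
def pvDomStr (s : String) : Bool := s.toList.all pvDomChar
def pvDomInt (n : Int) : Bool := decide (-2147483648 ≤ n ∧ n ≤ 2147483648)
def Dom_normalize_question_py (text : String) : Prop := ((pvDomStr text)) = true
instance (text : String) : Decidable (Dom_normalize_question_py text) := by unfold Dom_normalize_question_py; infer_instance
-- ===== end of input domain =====

-- B builds the prefix table compositionally and strips the LONGEST matching prefix
-- (order-independent fold) instead of A's ordered first-match scan with break; alternative decomposition, same cost.

-- ===== PORT A =====
-- A's flat, ordered prefix list (order matters in A: first match wins)
def pvPrefixesA : List (List Char) :=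
  [ "can you show me ".toList
  , "can you tell me ".toList
  , "can you give me ".toList
  , "can you list ".toList
  , "please show me ".toList
  , "please tell me ".toList
  , "please give me ".toList
  , "please list ".toList
  , "what were the ".toList
  , "what are the ".toList
  , "what is the ".toList
  , "what was the ".toList
  , "show me the ".toList
  , "give me the ".toList
  , "tell me the ".toList
  , "list the ".toList
  , "show me ".toList
  , "give me ".toList
  , "tell me ".toList
  , "list ".toList
  , "what ".toList
  , "how many ".toList
  , "how much ".toList ]

-- A's loop: strip the FIRST matching prefix, then break
def pvLoopA : List (List Char) → List Char → List Char
  | [], n => n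
  | p :: ps, n =>
    if PySem.Chars.startswith n p then
      PySem.List.slice n (some (PySem.Chars.len p)) none
    else pvLoopA ps n

def normalize_question_py (text : String) : String :=
  if text == "" then ""
  else
    let normalized := PySem.Chars.strip (PySem.Chars.lower text.toList)
    let normalized := pvLoopA pvPrefixesA normalized
    String.ofList (PySem.Chars.strip normalized)

-- ===== PORT B =====
-- B's prefix table, generated from verb/tense parts (comprehensions of Source B)
def pvPrefixesB : List (List Char) :=
  (["show me".toList, "tell me".toList, "give me".toList, "list".toList].map
     (fun v => "can you ".toList ++ v ++ " ".toList))
  ++ (["show me".toList, "tell me".toList, "give me".toList, "list".toList].map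
     (fun v => "please ".toList ++ v ++ " ".toList))
  ++ (["were".toList, "are".toList, "is".toList, "was".toList].map
     (fun t => "what ".toList ++ t ++ " the ".toList))
  ++ (["show me".toList, "give me".toList, "tell me".toList, "list".toList].map
     (fun v => v ++ " the ".toList))
  ++ (["show me".toList, "give me".toList, "tell me".toList, "list".toList].map
     (fun v => v ++ " ".toList))
  ++ ["what ".toList, "how many ".toList, "how much ".toList]

-- B's loop: keep the longest matching prefix seen so far
def pvBestB (n : List Char) (ps : List (List Char)) : List Char :=
  ps.foldl (fun best p =>
    if best.length < p.length && PySem.Chars.startswith n p then p else best) []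

def normalize_question_py_alt (text : String) : String :=
  if text == "" then ""
  else
    let normalized := PySem.Chars.strip (PySem.Chars.lower text.toList)
    let best := pvBestB normalized pvPrefixesB
    String.ofList (PySem.Chars.strip
      (PySem.List.slice normalized (some (PySem.Chars.len best)) none))

-- ===== PRECONDITION & SPEC =====
def Spec_normalize_question_py (text : String) (out : String) : Prop := out = normalize_question_py_alt text
instance (text : String) (out : String) : Decidable (Spec_normalize_question_py text out) := by unfold Spec_normalize_question_py; infer_instance

-- ===== CLAIM (what is proved, stated in full; the proofs are below) =====
def Claim_equal_normalize_question_py : Prop := ∀ (text : String), Dom_normalize_question_py text → Spec_normalize_question_py text (normalize_question_py text)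

-- ===== LEMMAS AND PROOFS =====

lemma pvLists_eq : pvPrefixesB = pvPrefixesA := by decide

-- once no later prefix can beat the accumulator, the fold keeps it
lemma pvBfold_keep (n : List Char) :
    ∀ (ps : List (List Char)) (acc : List Char),
      (∀ p ∈ ps, ¬(acc.length < p.length ∧ PySem.Chars.startswith n p = true)) →
      ps.foldl (fun best p =>
        if best.length < p.length && PySem.Chars.startswith n p then p else best) acc = acc := by
  intro ps
  induction ps with
  | nil => intro acc _; rfl
  | cons p ps ih =>
    intro acc h
    have hp := h p (by simp)
    have hcond : (decide (acc.length < p.length) && PySem.Chars.startswith n p) = false := by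
      by_cases hlt : acc.length < p.length
      · have hsf : PySem.Chars.startswith n p = false := by
          cases hcase : PySem.Chars.startswith n p
          · rfl
          · exact absurd ⟨hlt, hcase⟩ hp
        simp [hsf]
      · simp [hlt]
    simp only [List.foldl_cons, hcond, Bool.false_eq_true, if_false]
    exact ih acc (fun q hq => h q (by simp [hq]))

-- A's first-match strip equals dropping B's longest match, for any list in
-- which no element is a proper prefix of a later element
lemma pvLoop_eq (n : List Char) :
    ∀ (ps : List (List Char)),
      (∀ p ∈ ps, p ≠ []) →
      List.Pairwise (fun p q => ¬(p <+: q ∧ p ≠ q)) ps →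
      pvLoopA ps n =
        n.drop (ps.foldl (fun best p =>
          if best.length < p.length && PySem.Chars.startswith n p then p else best) []).length := by
  intro ps
  induction ps with
  | nil => intro _ _; simp [pvLoopA]
  | cons p ps ih =>
    intro hne hpw
    rcases List.pairwise_cons.mp hpw with ⟨hhead, htail⟩
    by_cases hs : PySem.Chars.startswith n p = true
    · have hplen : 0 < p.length := List.length_pos_iff.mpr (hne p (by simp))
      have hfold :
          (p :: ps).foldl (fun best q =>
            if best.length < q.length && PySem.Chars.startswith n q then q else best) [] = p := by
        simp only [List.foldl_cons]
        rw [if_pos (by simp [hs, hplen])]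
        apply pvBfold_keep
        intro q hq hcon
        rcases hcon with ⟨hlt, hsq⟩
        have hpn : p <+: n := (PySem.Chars.startswith_iff n p).mp hs
        have hqn : q <+: n := (PySem.Chars.startswith_iff n q).mp hsq
        rcases List.prefix_or_prefix_of_prefix hpn hqn with hpq | hqp
        · exact hhead q hq ⟨hpq, fun he => by subst he; omega⟩
        · have := List.IsPrefix.length_le hqp
          omega
      rw [hfold]
      simp only [pvLoopA, if_pos hs]
      rw [PySem.Chars.len_eq, PySem.List.slice_from_natCast]
    · have hfold :
          (p :: ps).foldl (fun best q =>
            if best.length < q.length && PySem.Chars.startswith n q then q else best) [] =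
          ps.foldl (fun best q =>
            if best.length < q.length && PySem.Chars.startswith n q then q else best) [] := by
        simp only [List.foldl_cons]
        rw [if_neg (by simp [hs])]
      rw [hfold]
      simp only [pvLoopA, if_neg hs]
      exact ih (fun q hq => hne q (by simp [hq])) htail

lemma pvPrefixesA_ne : ∀ p ∈ pvPrefixesA, p ≠ [] := by decide

lemma pvPrefixesA_pw : List.Pairwise (fun p q => ¬(p <+: q ∧ p ≠ q)) pvPrefixesA := by decide

-- ===== VERDICT (by name: the statement is the Claim_ definition above) =====
theorem normalize_question_py_spec : Claim_equal_normalize_question_py := by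
  intro text _
  unfold Spec_normalize_question_py normalize_question_py normalize_question_py_alt
  by_cases h : text == ""
  · simp [h]
  · simp only [h, if_false, Bool.false_eq_true]
    set n := PySem.Chars.strip (PySem.Chars.lower text.toList) with hn
    rw [pvLists_eq]
    rw [pvLoop_eq n pvPrefixesA pvPrefixesA_ne pvPrefixesA_pw]
    unfold pvBestB
    rw [PySem.Chars.len_eq, PySem.List.slice_from_natCast]
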